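-- pv_equiv track=rewrite | github.com/dataforgoodfr/13_democratiser_sobriete | stream3_visualization/Well-being/code/app.py | get_country_color
-- ===== SOURCE A (Python) =====
-- COUNTRY_COLORS = ['#ffd558', '#fb8072', '#b3de69', '#fdb462', '#bebada', '#8dd3c7', '#ffffb3']
--
-- EU_27_COLOR = '#80b1d3'
--
-- def get_country_color(country, all_countries):
--     """Assign consistent colors to countries across all charts"""
--     if country == 'All Countries':
--         return EU_27_COLOR
--
--     # Get all individual countries (excluding EU-27)
--     individual_countries = [c for c in all_countries if c != 'All Countries']
--     individual_countries.sort()  # Sort for consistent ordering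
--
--     if country in individual_countries:
--         index = individual_countries.index(country) % len(COUNTRY_COLORS)
--         return COUNTRY_COLORS[index]
--
--     return COUNTRY_COLORS[0]  # Default color
-- ===== SOURCE B (Python) =====
-- COUNTRY_COLORS = ['#ffd558', '#fb8072', '#b3de69', '#fdb462', '#bebada', '#8dd3c7', '#ffffb3']
--
-- EU_27_COLOR = '#80b1d3'
--
-- def get_country_color(country, all_countries):
--     """Assign consistent colors to countries across all charts"""
--     if country == 'All Countries':
--         return EU_27_COLOR
--     individual_countries = [c for c in all_countries if c != 'All Countries']
--     if country not in individual_countries: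
--         return COUNTRY_COLORS[0]
--     # rank in sorted order = number of strictly smaller elements (first occurrence under duplicates)
--     index = sum(1 for c in individual_countries if c < country)
--     return COUNTRY_COLORS[index % len(COUNTRY_COLORS)]
-- ===== Notes on version B (the rewrite author's own statement) =====
-- stated objective: alternative
-- what changed: Drops the sort and the .index scan: the sorted rank is computed directly as the count of strictly smaller individual countries in one pass; same measured cost (Python's sort is highly optimized).
import Mathlib
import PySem

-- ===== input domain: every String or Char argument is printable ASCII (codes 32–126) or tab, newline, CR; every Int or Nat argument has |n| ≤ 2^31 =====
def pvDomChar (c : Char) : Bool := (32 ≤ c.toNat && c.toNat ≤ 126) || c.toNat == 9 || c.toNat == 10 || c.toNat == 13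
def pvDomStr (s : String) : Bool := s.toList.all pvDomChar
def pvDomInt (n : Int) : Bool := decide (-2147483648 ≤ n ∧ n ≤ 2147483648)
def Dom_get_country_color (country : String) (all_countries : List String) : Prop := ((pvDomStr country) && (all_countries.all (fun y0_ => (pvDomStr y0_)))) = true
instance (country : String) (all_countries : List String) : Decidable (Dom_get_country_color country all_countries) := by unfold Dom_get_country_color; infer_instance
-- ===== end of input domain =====

-- B drops the sort and the .index scan: the sorted rank equals the count of strictly smaller elements (alternative algorithm, same measured cost).
-- ===== PORT A =====
def COUNTRY_COLORS : List String := ["#ffd558", "#fb8072", "#b3de69", "#fdb462", "#bebada", "#8dd3c7", "#ffffb3"]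

def EU_27_COLOR : String := "#80b1d3"

def get_country_color (country : String) (all_countries : List String) : String :=
  if country == "All Countries" then EU_27_COLOR
  else
    let individual_countries := all_countries.filter (fun c => c != "All Countries")
    let individual_countries := PySem.List.sorted individual_countries (fun x => x) false
    if individual_countries.contains country then
      -- .index succeeds because membership was just checked; index % 7 is in range, so getD is exact
      match PySem.List.index? individual_countries country with
      | some i => COUNTRY_COLORS.getD (i % COUNTRY_COLORS.length) ""
      | none => ""
    else COUNTRY_COLORS.getD 0 ""

-- ===== PORT B =====
def get_country_color_alt (country : String) (all_countries : List String) : String :=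
  if country == "All Countries" then EU_27_COLOR
  else
    let individual_countries := all_countries.filter (fun c => c != "All Countries")
    if !individual_countries.contains country then COUNTRY_COLORS.getD 0 ""
    else
      let index := individual_countries.countP (fun c => decide (c < country))
      COUNTRY_COLORS.getD (index % COUNTRY_COLORS.length) ""

-- ===== PRECONDITION & SPEC =====
def Spec_get_country_color (country : String) (all_countries : List String) (out : String) : Prop := out = get_country_color_alt country all_countries
instance (country : String) (all_countries : List String) (out : String) : Decidable (Spec_get_country_color country all_countries out) := by unfold Spec_get_country_color; infer_instance

-- ===== CLAIM (what is proved, stated in full; the proofs are below) =====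
def Claim_equal_get_country_color : Prop := ∀ (country : String) (all_countries : List String), Dom_get_country_color country all_countries → Spec_get_country_color country all_countries (get_country_color country all_countries)

-- ===== LEMMAS AND PROOFS =====
-- In a ≤-sorted list, the first index of a member equals the count of strictly smaller elements.
theorem index?_eq_countP_of_sorted (s : List String) (v : String)
    (hs : s.Pairwise (fun a b => a ≤ b)) (hv : v ∈ s) :
    PySem.List.index? s v = some (s.countP (fun c => decide (c < v))) := by
  induction s with
  | nil => cases hv
  | cons x t ih =>
    rcases List.pairwise_cons.1 hs with ⟨hx, ht⟩
    by_cases hxv : x = v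
    · subst hxv
      have h0 : t.countP (fun c => decide (c < x)) = 0 := by
        rw [List.countP_eq_zero]
        intro c hc
        simp only [decide_eq_true_eq]
        exact not_lt.2 (hx c hc)
      rw [PySem.List.index?_cons_self, List.countP_cons, h0]
      simp
    · rcases List.mem_cons.1 hv with h | hvt
      · exact absurd h.symm hxv
      have hxlt : x < v := lt_of_le_of_ne (hx v hvt) hxv
      rw [PySem.List.index?_cons_of_ne t hxv, ih ht hvt, List.countP_cons]
      simp [hxlt]

-- The two post-guard branches agree for an arbitrary filtered list.
theorem branch_eq (country : String) (ind : List String) :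
    (if (PySem.List.sorted ind (fun x => x) false).contains country then
        match PySem.List.index? (PySem.List.sorted ind (fun x => x) false) country with
        | some i => COUNTRY_COLORS.getD (i % COUNTRY_COLORS.length) ""
        | none => ""
      else COUNTRY_COLORS.getD 0 "")
    = (if !ind.contains country then COUNTRY_COLORS.getD 0 ""
      else COUNTRY_COLORS.getD ((ind.countP (fun c => decide (c < country))) % COUNTRY_COLORS.length) "") := by
  by_cases hm : country ∈ ind
  · have hvs : country ∈ PySem.List.sorted ind (fun x => x) false := by
      rw [PySem.List.mem_sorted]; exact hm
    have hsp : (PySem.List.sorted ind (fun x => x) false).Pairwise (fun a b : String => a ≤ b) :=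
      PySem.List.sorted_pairwise ind (fun x => x)
    have hidx := index?_eq_countP_of_sorted _ country hsp hvs
    have hcount : (PySem.List.sorted ind (fun x => x) false).countP (fun c => decide (c < country))
        = ind.countP (fun c => decide (c < country)) :=
      (PySem.List.sorted_perm ind (fun x => x) false).countP_eq _
    rw [hidx, hcount]
    simp [hm, PySem.List.mem_sorted]
  · simp [hm, PySem.List.mem_sorted]

theorem ports_agree (country : String) (all_countries : List String) :
    get_country_color country all_countries = get_country_color_alt country all_countries := by
  by_cases hc : country == "All Countries"
  · simp [get_country_color, get_country_color_alt, hc]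
  · have h := branch_eq country (all_countries.filter (fun c => c != "All Countries"))
    simpa [get_country_color, get_country_color_alt, hc] using h

-- ===== VERDICT (by name: the statement is the Claim_ definition above) =====
theorem get_country_color_spec : Claim_equal_get_country_color := by
  intro country all_countries _
  unfold Spec_get_country_color
  exact ports_agree country all_countries
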